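-- pv_equiv track=rewrite | github.com/Deferare/Problem-Solving | Programmers/직업군 추천하기.py | solution
-- ===== SOURCE A (Python) =====
-- def solution(table, languages, preference):
--     table = list(list(map(str, crnt.split(" "))) for crnt in table)
--     occupation_score = []
--     lagua_score = dict()
--     for i in range(len(languages)):
--         lagua_score[languages[i]] = preference[i]
--     for i in range(len(table)):
--         sub_result = [table[i][0], 0]
--         for j in range(1, len(table[i])):
--             if table[i][j] in languages:
--                 sub_result[1] += (lagua_score[table[i][j]] * (len(table[i])-j))
--         occupation_score.append(sub_result)
--     occupation_score = sorted(occupation_score, key=lambda x:(x[1], x[0]), reverse=True)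
--     for i in range(len(occupation_score)):
--         if i == len(occupation_score)-1 or occupation_score[i][1] != occupation_score[i+1][1]:
--             return occupation_score[i][0]
--     return occupation_score[0][0]
-- ===== SOURCE B (Python) =====
-- def solution(table, languages, preference):
--     pref = {}
--     for i in range(len(languages)):
--         pref[languages[i]] = preference[i]
--     best = None
--     for row in table:
--         parts = row.split(" ")
--         name = parts[0]
--         score = 0
--         for j, lang in enumerate(parts[1:], 1):
--             if lang in pref:
--                 score += pref[lang] * (len(parts) - j)
--         if best is None or score > best[1] or (score == best[1] and name < best[0]):
--             best = (name, score)
--     return best[0]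
-- ===== Notes on version B (the rewrite author's own statement) =====
-- stated objective: simpler
-- what changed: A builds all (name,score) pairs, sorts them by (score,name) descending and scans for the end of the first score-group; B keeps a single running best while iterating over the rows once (strictly greater score, or equal score and alphabetically smaller name, replaces the best), so the sorting step disappears.
import Mathlib
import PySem

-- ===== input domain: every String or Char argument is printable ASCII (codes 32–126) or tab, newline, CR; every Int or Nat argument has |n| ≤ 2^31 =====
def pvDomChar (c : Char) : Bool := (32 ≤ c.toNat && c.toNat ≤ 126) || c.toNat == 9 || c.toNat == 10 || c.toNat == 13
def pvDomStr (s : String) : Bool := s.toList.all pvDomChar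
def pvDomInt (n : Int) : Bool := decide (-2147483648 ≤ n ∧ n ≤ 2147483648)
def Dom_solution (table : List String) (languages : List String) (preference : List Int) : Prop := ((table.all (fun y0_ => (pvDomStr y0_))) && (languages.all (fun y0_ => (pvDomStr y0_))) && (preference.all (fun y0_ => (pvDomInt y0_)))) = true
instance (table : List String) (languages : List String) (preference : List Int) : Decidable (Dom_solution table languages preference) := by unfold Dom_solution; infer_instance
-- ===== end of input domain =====

-- B replaces A's sort-then-scan-for-the-score-boundary by a single-pass running-best
-- selection (strictly greater score, or equal score and alphabetically smaller name, wins);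
-- objective: simpler (no sorting step).

-- ===== PORT A =====
-- inner loop: for j in range(1, len(row)): if row[j] in languages: sub += lagua_score[row[j]] * (len(row)-j)
-- (structural recursion over the tail of the row carrying the Python index j; lagua_score[w]
--  is d.getD w 0 — the key is always present when the membership test succeeds)
def pyAInner (languages : List String) (d : PySem.Dict String Int) (n : Int) : Int → List String → Int → Int
  | _, [], acc => acc
  | j, w :: rest, acc =>
      pyAInner languages d n (j + 1) rest
        (if languages.contains w then acc + d.getD w 0 * (n - j) else acc)

-- final loop: return occupation_score[i][0] at the first i that ends a score-group
-- ([] corresponds to Python's IndexError on occupation_score[0][0]; excluded by Pre_)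
def pyAScan : List (String × Int) → String
  | [] => ""
  | [x] => x.1
  | x :: y :: rest => if x.2 ≠ y.2 then x.1 else pyAScan (y :: rest)

def solution (table : List String) (languages : List String) (preference : List Int) : String :=
  let tbl := table.map (fun crnt => (PySem.Str.split? crnt " ").getD [])
  let lagua := (PySem.List.pyRange 0 (languages.length : Int) 1).foldl
      (fun d i => d.insert (PySem.List.pyGetD languages i "") (PySem.List.pyGetD preference i 0))
      PySem.Dict.empty
  let occ := tbl.map (fun r => (r.headD "", pyAInner languages lagua (r.length : Int) 1 r.tail 0))
  pyAScan (PySem.List.sorted2 occ (fun x => x.2) (fun x => x.1) true)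

-- ===== PORT B =====
def solution_alt (table : List String) (languages : List String) (preference : List Int) : String :=
  let pref := (PySem.List.pyRange 0 (languages.length : Int) 1).foldl
      (fun d i => d.insert (PySem.List.pyGetD languages i "") (PySem.List.pyGetD preference i 0))
      PySem.Dict.empty
  let best := table.foldl (fun best row =>
      let parts := (PySem.Str.split? row " ").getD []
      let name := parts.headD ""
      let score := (PySem.List.enumerate parts.tail 1).foldl
          (fun acc p => if pref.contains p.2 then acc + pref.getD p.2 0 * ((parts.length : Int) - p.1) else acc) 0
      match best with
      | none => some (name, score)
      | some b => if b.2 < score ∨ (score = b.2 ∧ name < b.1) then some (name, score) else some b) none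
  match best with
  | some b => b.1
  | none => ""   -- Source B reaches this only for table = [] (then it raises; excluded by Pre_)

-- ===== PRECONDITION & SPEC =====
-- Pre_ excludes exactly the inputs where Python A raises: an empty table (IndexError on
-- occupation_score[0][0]) and languages longer than preference (IndexError on preference[i]).
def Pre_solution (table : List String) (languages : List String) (preference : List Int) : Prop :=
  table ≠ [] ∧ languages.length ≤ preference.length
instance (table : List String) (languages : List String) (preference : List Int) : Decidable (Pre_solution table languages preference) := by unfold Pre_solution; infer_instance

def pvWitness_solution : List String × List String × List Int :=
  (["jango python 3", "dev java python"], ["python", "java"], [5, 2])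

def Spec_solution (table : List String) (languages : List String) (preference : List Int) (out : String) : Prop := out = solution_alt table languages preference
instance (table : List String) (languages : List String) (preference : List Int) (out : String) : Decidable (Spec_solution table languages preference out) := by unfold Spec_solution; infer_instance

-- ===== CLAIM (what is proved, stated in full; the proofs are below) =====
def Claim_equal_solution : Prop := ∀ (table : List String) (languages : List String) (preference : List Int), Dom_solution table languages preference → Pre_solution table languages preference → Spec_solution table languages preference (solution table languages preference)

-- ===== LEMMAS AND PROOFS =====

def pvBf (a b : String × Int) : Bool :=
  decide (b.2 < a.2) || (!decide (a.2 < b.2) && decide (b.1 < a.1))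
def pvAbove (a b : String × Int) : Prop :=
  b.2 < a.2 ∨ (b.2 = a.2 ∧ b.1 ≤ a.1)
theorem pvBf_false_iff (a b : String × Int) : pvBf a b = false ↔ pvAbove b a := by
  simp only [pvBf, pvAbove, Bool.or_eq_false_iff, Bool.and_eq_false_iff, Bool.not_eq_false',
    decide_eq_false_iff_not, decide_eq_true_eq, not_lt]
  constructor
  · rintro ⟨h1, h2 | h2⟩
    · exact Or.inl h2
    · rcases eq_or_lt_of_le h1 with h | h
      · exact Or.inr ⟨h.symm ▸ rfl, h2⟩
      · exact Or.inl h
  · rintro (h | ⟨h1, h2⟩)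
    · exact ⟨le_of_lt h, Or.inl h⟩
    · exact ⟨h1.le, Or.inr h2⟩
theorem pvBf_true_iff (a b : String × Int) : pvBf a b = true ↔ (b.2 < a.2 ∨ (b.2 = a.2 ∧ b.1 < a.1)) := by
  simp only [pvBf, Bool.or_eq_true, Bool.and_eq_true, Bool.not_eq_true', decide_eq_true_eq,
    decide_eq_false_iff_not, not_lt]
  constructor
  · rintro (h | ⟨h1, h2⟩)
    · exact Or.inl h
    · rcases eq_or_lt_of_le h1 with h | h
      · exact Or.inr ⟨h, h2⟩
      · exact Or.inl h
  · rintro (h | ⟨h1, h2⟩)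
    · exact Or.inl h
    · exact Or.inr ⟨le_of_eq h1, h2⟩
theorem pv_sorted2_eq (occ : List (String × Int)) :
    PySem.List.sorted2 occ (fun x => x.2) (fun x => x.1) true
      = occ.foldl (fun acc x => PySem.List.insertBy pvBf x acc) [] := by
  rfl
theorem pv_insertBy_pairwise (x : String × Int) (ys : List (String × Int))
    (h : ys.Pairwise pvAbove) : (PySem.List.insertBy pvBf x ys).Pairwise pvAbove := by
  induction ys with
  | nil => simp [PySem.List.insertBy]
  | cons y ys ih =>
    rcases List.pairwise_cons.mp h with ⟨hy, hys⟩
    by_cases hxy : pvBf x y = true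
    · rw [show PySem.List.insertBy pvBf x (y :: ys) = x :: y :: ys from by
        simp [PySem.List.insertBy, hxy]]
      refine List.pairwise_cons.mpr ⟨?_, h⟩
      intro z hz
      have hxy' := (pvBf_true_iff x y).mp hxy
      rcases List.mem_cons.mp hz with rfl | hz
      · rcases hxy' with h' | ⟨h1, h2⟩
        · exact Or.inl h'
        · exact Or.inr ⟨h1, h2.le⟩
      · have hyz := hy z hz
        rcases hxy' with h' | ⟨h1, h2⟩ <;> rcases hyz with h'' | ⟨h3, h4⟩
        · exact Or.inl (h''.trans h')
        · exact Or.inl (h3 ▸ h')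
        · exact Or.inl (h1 ▸ h'')
        · exact Or.inr ⟨h3.trans h1, h4.trans h2.le⟩
    · rw [show PySem.List.insertBy pvBf x (y :: ys) = y :: PySem.List.insertBy pvBf x ys from by
        simp [PySem.List.insertBy, hxy]]
      refine List.pairwise_cons.mpr ⟨?_, ih hys⟩
      intro z hz
      rcases (PySem.List.mem_insertBy pvBf x z ys).mp hz with hz1 | hz
      · rw [hz1]
        exact (pvBf_false_iff x y).mp (by simpa using hxy)
      · exact hy z hz
theorem pv_foldl_ins_pairwise (l acc : List (String × Int)) (h : acc.Pairwise pvAbove) :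
    (l.foldl (fun acc x => PySem.List.insertBy pvBf x acc) acc).Pairwise pvAbove := by
  induction l generalizing acc with
  | nil => exact h
  | cons x l ih => exact ih _ (pv_insertBy_pairwise x acc h)
theorem pv_sorted_pairwise (occ : List (String × Int)) :
    (PySem.List.sorted2 occ (fun x => x.2) (fun x => x.1) true).Pairwise pvAbove := by
  rw [pv_sorted2_eq]
  exact pv_foldl_ins_pairwise occ [] (List.Pairwise.nil)
def pvQ (l : List (String × Int)) (n : String) : Prop :=
  ∃ s, (n, s) ∈ l ∧ ∀ p ∈ l, p.2 < s ∨ (p.2 = s ∧ n ≤ p.1)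
theorem pv_scan_Q (l : List (String × Int)) (hp : l.Pairwise pvAbove) (hne : l ≠ []) :
    pvQ l (pyAScan l) := by
  induction l with
  | nil => exact absurd rfl hne
  | cons x t ih =>
    rcases List.pairwise_cons.mp hp with ⟨hx, ht⟩
    match t with
    | [] =>
      refine ⟨x.2, by simp [pyAScan], ?_⟩
      intro p hp'
      rcases List.mem_singleton.mp hp' with rfl
      exact Or.inr ⟨rfl, le_refl _⟩
    | y :: rest =>
      by_cases hsc : x.2 = y.2
      · have hscan : pyAScan (x :: y :: rest) = pyAScan (y :: rest) := by
          simp [pyAScan, hsc]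
        rw [hscan]
        rcases ih ht (by simp) with ⟨s, hmem, hbound⟩
        refine ⟨s, List.mem_cons_of_mem _ hmem, ?_⟩
        intro p hp'
        rcases List.mem_cons.mp hp' with rfl | hp'
        · -- p = x : use the bound at y together with x.2 = y.2 and pvAbove x y
          have hxy := hx y (List.mem_cons_self)
          have hby := hbound y (List.mem_cons_self)
          rcases hby with h' | ⟨h1, h2⟩
          · exact Or.inl (hsc ▸ h')
          · rcases hxy with h' | ⟨h3, h4⟩
            · exact absurd h' (by rw [hsc]; exact lt_irrefl _)
            · exact Or.inr ⟨hsc ▸ h1, h2.trans h4⟩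
        · exact hbound p hp'
      · have hscan : pyAScan (x :: y :: rest) = x.1 := by
          simp [pyAScan, hsc]
        rw [hscan]
        refine ⟨x.2, List.mem_cons_self, ?_⟩
        intro p hp'
        rcases List.mem_cons.mp hp' with rfl | hp'
        · exact Or.inr ⟨rfl, le_refl _⟩
        · have hyx : y.2 < x.2 := by
            rcases hx y List.mem_cons_self with h' | ⟨h1, _⟩
            · exact h'
            · exact absurd h1.symm hsc
          have hpy : p.2 ≤ y.2 := by
            rcases List.mem_cons.mp hp' with rfl | hp2
            · exact le_refl _
            · rcases (List.pairwise_cons.mp ht).1 p hp2 with h' | ⟨h1, _⟩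
              · exact h'.le
              · exact h1.le
          exact Or.inl (lt_of_le_of_lt hpy hyx)
theorem pvQ_unique (l : List (String × Int)) (n1 n2 : String)
    (h1 : pvQ l n1) (h2 : pvQ l n2) : n1 = n2 := by
  rcases h1 with ⟨s1, hm1, hb1⟩
  rcases h2 with ⟨s2, hm2, hb2⟩
  have c1 := hb2 (n1, s1) hm1
  have c2 := hb1 (n2, s2) hm2
  simp only at c1 c2
  rcases c1 with h | ⟨hs, hn⟩ <;> rcases c2 with h' | ⟨hs', hn'⟩
  · exact absurd (h.trans h') (lt_irrefl _)
  · exact absurd (hs' ▸ h) (lt_irrefl _)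
  · exact absurd (hs ▸ h') (lt_irrefl _)
  · exact le_antisymm hn' hn
theorem pv_fold_Q (l : List (String × Int)) (p : String × Int) :
    ∃ q, l.foldl (fun best x => match best with
        | none => some x
        | some b => if b.2 < x.2 ∨ (x.2 = b.2 ∧ x.1 < b.1) then some x else some b) (some p) = some q
      ∧ (q ∈ p :: l ∧ ∀ r ∈ p :: l, r.2 < q.2 ∨ (r.2 = q.2 ∧ q.1 ≤ r.1)) := by
  induction l generalizing p with
  | nil =>
    refine ⟨p, rfl, List.mem_singleton.mpr rfl, ?_⟩
    intro r hr
    rcases List.mem_singleton.mp hr with rfl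
    exact Or.inr ⟨rfl, le_refl _⟩
  | cons x l ih =>
    by_cases hc : p.2 < x.2 ∨ (x.2 = p.2 ∧ x.1 < p.1)
    · rcases ih x with ⟨q, hq, hqm, hqb⟩
      have hstep : (if p.2 < x.2 ∨ (x.2 = p.2 ∧ x.1 < p.1) then some x else some p) = some x := if_pos hc
      refine ⟨q, by simp only [List.foldl_cons]; rw [hstep]; exact hq, ?_, ?_⟩
      · rcases List.mem_cons.mp hqm with rfl | h
        · exact List.mem_cons_of_mem _ List.mem_cons_self
        · exact List.mem_cons_of_mem _ (List.mem_cons_of_mem _ h)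
      · intro r hr
        rcases List.mem_cons.mp hr with rfl | hr
        · -- r = p : dominated by x which is dominated by q
          have hxq := hqb x List.mem_cons_self
          rcases hc with h | ⟨h1, h2⟩ <;> rcases hxq with h' | ⟨h3, h4⟩
          · exact Or.inl (h.trans h')
          · exact Or.inl (h3 ▸ h)
          · exact Or.inl (h1 ▸ h')
          · exact Or.inr ⟨h1 ▸ h3, h4.trans h2.le⟩
        · exact hqb r hr
    · rcases ih p with ⟨q, hq, hqm, hqb⟩
      have hstep : (if p.2 < x.2 ∨ (x.2 = p.2 ∧ x.1 < p.1) then some x else some p) = some p := if_neg hc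
      refine ⟨q, by simp only [List.foldl_cons]; rw [hstep]; exact hq, ?_, ?_⟩
      · rcases List.mem_cons.mp hqm with rfl | h
        · exact List.mem_cons_self
        · exact List.mem_cons_of_mem _ (List.mem_cons_of_mem _ h)
      · intro r hr
        rcases List.mem_cons.mp hr with rfl | hr
        · exact hqb r List.mem_cons_self
        · rcases List.mem_cons.mp hr with rfl | hr
          · -- r = x : x is dominated by p (¬hc), p dominated by q
            have hpq := hqb p List.mem_cons_self
            have hxp : r.2 < p.2 ∨ (r.2 = p.2 ∧ p.1 ≤ r.1) := by
              rcases lt_trichotomy p.2 r.2 with h | h | h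
              · exact absurd (Or.inl h) hc
              · exact Or.inr ⟨h.symm, not_lt.mp (fun hlt => hc (Or.inr ⟨h.symm, hlt⟩))⟩
              · exact Or.inl h
            rcases hxp with h | ⟨h1, h2⟩ <;> rcases hpq with h' | ⟨h3, h4⟩
            · exact Or.inl (h.trans h')
            · exact Or.inl (h3 ▸ h)
            · exact Or.inl (h1 ▸ h')
            · exact Or.inr ⟨h1 ▸ h3, h4.trans h2⟩
          · exact hqb r (List.mem_cons_of_mem _ hr)

theorem pvQ_perm (l l' : List (String × Int)) (hp : l.Perm l') (n : String)
    (h : pvQ l n) : pvQ l' n := by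
  rcases h with ⟨s, hm, hb⟩
  exact ⟨s, hp.mem_iff.mp hm, fun p hp' => hb p (hp.mem_iff.mpr hp')⟩

-- proof-side names for shared subterms of the two ports
def pvSplit (c : String) : List String := (PySem.Str.split? c " ").getD []

def pvDict (languages : List String) (preference : List Int) : PySem.Dict String Int :=
  (PySem.List.pyRange 0 (languages.length : Int) 1).foldl
    (fun d i => d.insert (PySem.List.pyGetD languages i "") (PySem.List.pyGetD preference i 0))
    PySem.Dict.empty

def pvRowA (languages : List String) (preference : List Int) (r : List String) : String × Int :=
  (r.headD "", pyAInner languages (pvDict languages preference) (r.length : Int) 1 r.tail 0)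

def pvRowB (languages : List String) (preference : List Int) (r : List String) : String × Int :=
  (r.headD "",
    (PySem.List.enumerate r.tail 1).foldl
      (fun acc p => if (pvDict languages preference).contains p.2 then
          acc + (pvDict languages preference).getD p.2 0 * ((r.length : Int) - p.1) else acc) 0)

-- the running-best step of B, extracted
def pvStep (best : Option (String × Int)) (x : String × Int) : Option (String × Int) :=
  match best with
  | none => some x
  | some b => if b.2 < x.2 ∨ (x.2 = b.2 ∧ x.1 < b.1) then some x else some b

theorem pv_dict_contains (languages : List String) (preference : List Int) (w : String) :
    (pvDict languages preference).contains w = languages.contains w := by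
  unfold pvDict
  rw [Bool.eq_iff_iff, PySem.Dict.contains_iff_mem_keys, PySem.Dict.keys_foldl_insert_key,
    PySem.List.map_pyGetD_pyRange_zero']
  simp [PySem.Set.mem_update]

theorem pv_inner_eq (languages : List String) (d : PySem.Dict String Int)
    (hm : ∀ w, d.contains w = languages.contains w) (n : Int)
    (rest : List String) : ∀ (j acc : Int),
    pyAInner languages d n j rest acc
      = (PySem.List.enumerate rest j).foldl
          (fun acc p => if d.contains p.2 then acc + d.getD p.2 0 * (n - p.1) else acc) acc := by
  induction rest with
  | nil => intro j acc; rfl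
  | cons w rest ih =>
    intro j acc
    rw [PySem.List.enumerate_cons]
    simp only [List.foldl_cons]
    rw [pyAInner, ih, hm w]

theorem pv_row_eq (languages : List String) (preference : List Int) (r : List String) :
    pvRowA languages preference r = pvRowB languages preference r := by
  unfold pvRowA pvRowB
  rw [pv_inner_eq languages (pvDict languages preference) (pv_dict_contains languages preference) _ r.tail 1 0]

theorem pv_main (occ : List (String × Int)) (x : String × Int) (t : List (String × Int))
    (hocc : occ = x :: t) :
    pyAScan (PySem.List.sorted2 occ (fun a => a.2) (fun a => a.1) true)
      = (match occ.foldl pvStep none with | some b => b.1 | none => "") := by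
  rcases pv_fold_Q t x with ⟨q, hq, hqm, hqb⟩
  have hfold : occ.foldl pvStep none = some q := by
    rw [hocc, List.foldl_cons]
    exact hq
  rw [hfold]
  have hQB : pvQ occ q.1 := by
    refine ⟨q.2, ?_, ?_⟩
    · rw [hocc]; simpa using hqm
    · intro p hp; rw [hocc] at hp; exact hqb p hp
  have hsp := pv_sorted_pairwise occ
  have hperm := PySem.List.sorted2_perm occ (fun a => a.2) (fun a => a.1) true
  have hne : PySem.List.sorted2 occ (fun a => a.2) (fun a => a.1) true ≠ [] := by
    intro hnil
    rw [hnil] at hperm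
    rw [hocc] at hperm
    exact absurd hperm.symm.eq_nil (by simp)
  have hQA := pvQ_perm _ _ hperm _ (pv_scan_Q _ hsp hne)
  exact pvQ_unique occ _ _ hQA hQB

-- ===== VERDICT (by name: the statement is the Claim_ definition above) =====
theorem solution_spec : Claim_equal_solution := by
  unfold Claim_equal_solution
  intro table languages preference _ hpre
  unfold Spec_solution
  have hA : solution table languages preference
      = pyAScan (PySem.List.sorted2 ((table.map pvSplit).map (pvRowA languages preference))
          (fun a => a.2) (fun a => a.1) true) := rfl
  have hB : solution_alt table languages preference
      = (match (table.map (fun c => pvRowB languages preference (pvSplit c))).foldl pvStep none with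
         | some b => b.1 | none => "") := by
    rw [List.foldl_map]
    rfl
  have hmapeq : (table.map pvSplit).map (pvRowA languages preference)
      = table.map (fun c => pvRowB languages preference (pvSplit c)) := by
    rw [List.map_map]
    exact List.map_congr_left (fun c _ => pv_row_eq languages preference (pvSplit c))
  rw [hA, hB, hmapeq]
  cases table with
  | nil => exact absurd rfl hpre.1
  | cons c t =>
    exact pv_main _ _ _ List.map_cons
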